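-- pv_equiv track=rewrite | github.com/zalavariandris/pylive | pylive/QtScriptEditor/components/ScriptCursor.py | unindent_text
-- ===== SOURCE A (Python) =====
-- def unindent_text(text, indent="\t"):
-- 	lines = text.split("\n")
-- 	unindented_lines = []
-- 	for i, line in enumerate(lines):
-- 		if line.startswith(indent):
-- 			unindented_lines.append(line[len(indent):])
-- 		else:
-- 			unindented_lines.append(line)
-- 	return "\n".join(unindented_lines)
-- ===== SOURCE B (Python) =====
-- import re
--
-- def unindent_text(text, indent="\t"):
--     return re.sub("^" + re.escape(indent), "", text, flags=re.MULTILINE)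
-- ===== Notes on version B (the rewrite author's own statement) =====
-- stated objective: idiomatic
-- what changed: Replaces the split-into-lines / per-line loop / join pipeline with a single anchored multiline regex substitution that strips one literal indent at each line start.
-- outside the precondition, e.g. on unindent_text('\n\n', '\n'): A returns '\n\n', B returns ''
import Mathlib
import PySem

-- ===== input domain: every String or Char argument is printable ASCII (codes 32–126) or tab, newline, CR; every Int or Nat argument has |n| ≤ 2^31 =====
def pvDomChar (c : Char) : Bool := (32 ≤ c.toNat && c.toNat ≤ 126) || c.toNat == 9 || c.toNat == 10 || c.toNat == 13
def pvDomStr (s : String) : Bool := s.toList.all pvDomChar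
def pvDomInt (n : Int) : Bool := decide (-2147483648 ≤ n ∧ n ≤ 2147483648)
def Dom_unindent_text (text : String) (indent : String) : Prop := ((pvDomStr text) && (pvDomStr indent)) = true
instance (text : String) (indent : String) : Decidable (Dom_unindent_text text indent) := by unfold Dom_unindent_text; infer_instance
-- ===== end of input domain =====

-- B replaces A's split / per-line loop / join with one anchored multiline regex substitution (idiomatic); return value only, no mutation.

-- ===== PORT A =====
-- literal transliteration: split on "\n", loop with enumerate appending per line, join
def unindent_text (text : String) (indent : String) : String :=
  let lines := PySem.Chars.splitOn text.toList ['\n']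
  let unindented_lines := (PySem.List.enumerate lines 0).foldl
    (fun acc il =>
      if PySem.Chars.startswith il.2 indent.toList then
        acc ++ [PySem.Chars.slice il.2 (some (PySem.Chars.len indent.toList)) none]
      else acc ++ [il.2]) []
  String.ofList (PySem.Chars.join ['\n'] unindented_lines)

-- ===== PORT B =====
-- hand port of re.sub("^" + re.escape(indent), "", text, flags=re.MULTILINE):
-- the pattern is the literal string `indent` anchored at a line start, so the
-- substitution removes one occurrence of `indent` at the start of the string and
-- right after every '\n'; exact on the admitted inputs (indent contains no '\n').
def pvStripIndent (ind s : List Char) : List Char :=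
  if ind.isPrefixOf s then s.drop ind.length else s

theorem pvStripIndent_length_le (ind s : List Char) : (pvStripIndent ind s).length ≤ s.length := by
  unfold pvStripIndent; split <;> simp

def pvSubLines (ind : List Char) : List Char → List Char
  | [] => []
  | c :: rest =>
    if c = '\n' then c :: pvSubLines ind (pvStripIndent ind rest)
    else c :: pvSubLines ind rest
termination_by s => s.length
decreasing_by
  · have := pvStripIndent_length_le ind rest; simp; omega
  · simp

def unindent_text_alt (text : String) (indent : String) : String :=
  String.ofList (pvSubLines indent.toList (pvStripIndent indent.toList text.toList))

-- ===== PRECONDITION & SPEC =====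
-- Pre_ excludes indent strings containing a newline — a corner no caller of an
-- unindent helper would specify: A's per-line split can never match such an indent
-- (it returns the text unchanged), while B's multiline anchor can match it across
-- line boundaries and strip newlines.
def Pre_unindent_text (text : String) (indent : String) : Prop :=
  '\n' ∉ indent.toList
instance (text : String) (indent : String) : Decidable (Pre_unindent_text text indent) := by
  unfold Pre_unindent_text; infer_instance

def pvWitness_unindent_text : String × String := ("\tab\n\tcd\nef", "\t")

def Spec_unindent_text (text : String) (indent : String) (out : String) : Prop := out = unindent_text_alt text indent
instance (text : String) (indent : String) (out : String) : Decidable (Spec_unindent_text text indent out) := by unfold Spec_unindent_text; infer_instance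

-- ===== CLAIM (what is proved, stated in full; the proofs are below) =====
def Claim_equal_unindent_text : Prop := ∀ (text : String) (indent : String), Dom_unindent_text text indent → Pre_unindent_text text indent → Spec_unindent_text text indent (unindent_text text indent)

-- ===== LEMMAS AND PROOFS =====

-- the line decomposition A's split computes, phrased structurally
def pvLines : List Char → List Char → List (List Char)
  | cur, [] => [cur.reverse]
  | cur, c :: rest => if c = '\n' then cur.reverse :: pvLines [] rest else pvLines (c :: cur) rest

theorem pvGo_spec (fuel : Nat) : ∀ (l cur : List Char) (acc : List (List Char)),
    l.length < fuel →
    PySem.Chars.splitOn.go ['\n'] fuel l cur acc = acc.reverse ++ pvLines cur l := by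
  induction fuel with
  | zero => intro l cur acc h; omega
  | succ n ih =>
    intro l cur acc h
    cases l with
    | nil => simp [PySem.Chars.splitOn.go, pvLines]
    | cons c rest =>
      by_cases hc : c = '\n'
      · subst hc
        have hp : List.isPrefixOf ['\n'] ('\n' :: rest) = true := by
          simp [List.isPrefixOf]
        rw [PySem.Chars.splitOn.go]
        simp only [hp, if_pos]
        rw [ih _ _ _ (by simpa using Nat.lt_of_succ_lt_succ h)]
        simp [pvLines]
      · have hp : List.isPrefixOf ['\n'] (c :: rest) = false := by
          simp [List.isPrefixOf]; intro h'; exact hc h'.symm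
        rw [PySem.Chars.splitOn.go]
        simp only [hp, Bool.false_eq_true, if_false]
        rw [ih _ _ _ (by simpa using Nat.lt_of_succ_lt_succ h)]
        simp [pvLines, hc]

theorem pvSplitOn_eq (s : List Char) :
    PySem.Chars.splitOn s ['\n'] = pvLines [] s := by
  unfold PySem.Chars.splitOn
  rw [pvGo_spec (s.length + 1) s [] [] (by omega)]
  simp

theorem pvFoldl_enum_map {α β : Type} (p : α → Bool) (f g : α → β) :
    ∀ (xs : List α) (s : Int) (acc : List β),
    (PySem.List.enumerate xs s).foldl
      (fun acc il => if p il.2 then acc ++ [f il.2] else acc ++ [g il.2]) acc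
    = acc ++ xs.map (fun x => if p x then f x else g x) := by
  intro xs
  induction xs with
  | nil => intro s acc; simp [PySem.List.enumerate_nil]
  | cons x rest ih =>
    intro s acc
    rw [PySem.List.enumerate_cons]
    simp only [List.foldl_cons, List.map_cons]
    rw [ih (s + 1)]
    by_cases hp : p x = true <;> simp [hp]

theorem pvLines_ne_nil (cur s : List Char) : pvLines cur s ≠ [] := by
  induction s generalizing cur with
  | nil => simp [pvLines]
  | cons c rest ih =>
    by_cases hc : c = '\n' <;> simp [pvLines, hc, ih]

theorem pvJoin_cons (p : List Char) (rest : List (List Char)) (h : rest ≠ []) :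
    PySem.Chars.join ['\n'] (p :: rest) = p ++ '\n' :: PySem.Chars.join ['\n'] rest := by
  cases rest with
  | nil => exact absurd rfl h
  | cons q t => rw [PySem.Chars.join_cons_cons]; simp

theorem pvLines_no_nl (s : List Char) (h : '\n' ∉ s) :
    ∀ cur, pvLines cur s = [cur.reverse ++ s] := by
  induction s with
  | nil => intro cur; simp [pvLines]
  | cons c rest ih =>
    intro cur
    have hc : c ≠ '\n' := fun hx => h (hx ▸ List.mem_cons_self ..)
    rw [pvLines, if_neg hc, ih (fun hx => h (List.mem_cons_of_mem _ hx))]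
    simp

theorem pvLines_append (l : List Char) (h : '\n' ∉ l) :
    ∀ (cur r : List Char), pvLines cur (l ++ '\n' :: r) = (cur.reverse ++ l) :: pvLines [] r := by
  induction l with
  | nil => intro cur r; simp [pvLines]
  | cons c rest ih =>
    intro cur r
    have hc : c ≠ '\n' := fun hx => h (hx ▸ List.mem_cons_self ..)
    rw [List.cons_append, pvLines, if_neg hc,
      ih (fun hx => h (List.mem_cons_of_mem _ hx))]
    simp

theorem pvG_eq (ind : List Char) : ∀ (l : List Char),
    (if PySem.Chars.startswith l ind then
        PySem.Chars.slice l (some (PySem.Chars.len ind)) none else l)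
    = pvStripIndent ind l := by
  intro l
  unfold pvStripIndent
  by_cases hp : ind.isPrefixOf l
  · have hsw : PySem.Chars.startswith l ind = true :=
      (PySem.Chars.startswith_iff l ind).mpr (List.isPrefixOf_iff_prefix.mp hp)
    rw [if_pos hsw, if_pos hp, PySem.Chars.len_eq]
    simp [PySem.Chars.slice_eq_listSlice, PySem.List.slice_from_natCast]
  · have hsw : ¬ PySem.Chars.startswith l ind = true := by
      intro hx
      exact hp (List.isPrefixOf_iff_prefix.mpr ((PySem.Chars.startswith_iff l ind).mp hx))
    rw [if_neg hsw, if_neg hp]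

theorem pvStrip_no_nl (ind s : List Char) (h : '\n' ∉ s) : '\n' ∉ pvStripIndent ind s := by
  unfold pvStripIndent
  split
  · intro hx; exact h (List.mem_of_mem_drop hx)
  · exact h

theorem pvSubLines_no_nl (ind : List Char) (s : List Char) (h : '\n' ∉ s) :
    pvSubLines ind s = s := by
  induction s with
  | nil => simp [pvSubLines]
  | cons c rest ih =>
    have hc : c ≠ '\n' := fun hx => h (hx ▸ List.mem_cons_self ..)
    rw [pvSubLines, if_neg hc, ih (fun hx => h (List.mem_cons_of_mem _ hx))]

theorem pvSubLines_append (ind l : List Char) (h : '\n' ∉ l) :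
    ∀ r, pvSubLines ind (l ++ '\n' :: r) = l ++ '\n' :: pvSubLines ind (pvStripIndent ind r) := by
  induction l with
  | nil => intro r; simp [pvSubLines]
  | cons c rest ih =>
    intro r
    have hc : c ≠ '\n' := fun hx => h (hx ▸ List.mem_cons_self ..)
    rw [List.cons_append, pvSubLines, if_neg hc,
      ih (fun hx => h (List.mem_cons_of_mem _ hx))]
    simp

theorem pvStrip_append (ind l r : List Char) (hind : '\n' ∉ ind) (hl : '\n' ∉ l) :
    pvStripIndent ind (l ++ '\n' :: r) = pvStripIndent ind l ++ '\n' :: r := by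
  unfold pvStripIndent
  by_cases hp : ind.isPrefixOf l
  · have hpfx : ind <+: l := List.isPrefixOf_iff_prefix.mp hp
    have hlen : ind.length ≤ l.length := hpfx.length_le
    have hp2 : ind.isPrefixOf (l ++ '\n' :: r) = true :=
      List.isPrefixOf_iff_prefix.mpr (hpfx.trans (List.prefix_append l _))
    rw [if_pos hp2, if_pos hp, List.drop_append_of_le_length hlen]
  · have hp2 : ¬ ind.isPrefixOf (l ++ '\n' :: r) = true := by
      intro hx
      have hpfx : ind <+: l ++ '\n' :: r := List.isPrefixOf_iff_prefix.mp hx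
      by_cases hlen : ind.length ≤ l.length
      · exact hp (List.isPrefixOf_iff_prefix.mpr
          (List.prefix_of_prefix_length_le hpfx (List.prefix_append l _) hlen))
      · -- ind extends past l, so '\n' ∈ ind, contradicting hind
        have htake : ind = (l ++ '\n' :: r).take ind.length := List.prefix_iff_eq_take.mp hpfx
        rw [List.take_append] at htake
        obtain ⟨k, hk⟩ : ∃ k, ind.length - l.length = k + 1 := ⟨ind.length - l.length - 1, by omega⟩
        rw [hk, List.take_of_length_le (by omega), List.take_succ_cons] at htake
        exact hind (htake ▸ (by simp))
    rw [if_neg hp2, if_neg hp]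

theorem pvMain (ind : List Char) (hind : '\n' ∉ ind) : ∀ (s : List Char),
    PySem.Chars.join ['\n'] ((pvLines [] s).map (pvStripIndent ind))
    = pvSubLines ind (pvStripIndent ind s) := by
  intro s
  induction hn : s.length using Nat.strong_induction_on generalizing s with
  | _ n ih =>
  by_cases hmem : '\n' ∈ s
  · -- split s at its FIRST newline: s = l ++ '\n' :: r with l newline-free
    obtain ⟨l, r, hsplit, hl⟩ : ∃ l r, s = l ++ '\n' :: r ∧ '\n' ∉ l := by
      refine ⟨s.takeWhile (fun c => !(c = '\n' : Bool)),
        (s.dropWhile (fun c => !(c = '\n' : Bool))).tail, ?_, ?_⟩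
      · have hne : s.dropWhile (fun c => !(c = '\n' : Bool)) ≠ [] := by
          intro hx
          have hs := List.takeWhile_append_dropWhile (p := fun c => !(c = '\n' : Bool)) (l := s)
          rw [hx, List.append_nil] at hs
          rw [← hs] at hmem
          have := List.mem_takeWhile_imp hmem
          simp at this
        have hhead : (s.dropWhile (fun c => !(c = '\n' : Bool))).head hne = '\n' := by
          have := List.head_dropWhile_not (fun c => !(c = '\n' : Bool)) hne
          simpa using this
        conv_lhs => rw [← List.takeWhile_append_dropWhile (p := fun c => !(c = '\n' : Bool)) (l := s)]
        congr 1
        have hct := (List.cons_head_tail hne).symm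
        rw [hhead] at hct
        exact hct
      · intro hx
        have := List.mem_takeWhile_imp hx
        simp at this
    subst hsplit
    rw [pvLines_append l hl []]
    simp only [List.reverse_nil, List.nil_append, List.map_cons]
    rw [pvJoin_cons _ _ (by
      intro hx
      exact pvLines_ne_nil [] r (List.map_eq_nil_iff.mp hx))]
    rw [ih r.length (by simp at hn; omega) r rfl]
    rw [pvStrip_append ind l r hind hl]
    rw [pvSubLines_append ind _ (pvStrip_no_nl ind l hl)]
  · rw [pvLines_no_nl s hmem []]
    simp only [List.reverse_nil, List.nil_append, List.map_cons, List.map_nil]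
    rw [PySem.Chars.join_singleton]
    rw [pvSubLines_no_nl ind _ (pvStrip_no_nl ind s hmem)]

-- ===== VERDICT (by name: the statement is the Claim_ definition above) =====
theorem unindent_text_spec : Claim_equal_unindent_text := by
  intro text indent _ hpre
  unfold Spec_unindent_text unindent_text unindent_text_alt
  dsimp only
  rw [pvSplitOn_eq,
    pvFoldl_enum_map (fun l => PySem.Chars.startswith l indent.toList)
      (fun l => PySem.Chars.slice l (some (PySem.Chars.len indent.toList)) none)
      (fun l => l) _ 0 []]
  rw [List.nil_append,
    List.map_congr_left (fun l _ => pvG_eq indent.toList l),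
    pvMain indent.toList hpre text.toList]
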